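-- pv_equiv track=rewrite | github.com/Yash-Singh1/competitive-programming | usaco/usopen-2021/bronze/problem-2/problem-2.py | interpretPublication
-- ===== SOURCE A (Python) =====
-- def interpretPublication(publication):
--   workDone = []
--   for publicationAuthorIndex, publicationAuthor in enumerate(publication):
--     if publicationAuthorIndex == 0:
--       workDone.append([publicationAuthor])
--     elif sorted([publication[publicationAuthorIndex - 1], publicationAuthor])[1] is publicationAuthor:
--       workDone[-1].append(publicationAuthor)
--     else:
--       workDone.append([publicationAuthor])
--   return workDone
-- ===== SOURCE B (Python) =====
-- def interpretPublication(publication):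
--   res = []
--   n = len(publication)
--   i = 0
--   while i < n:
--     j = i + 1
--     while j < n and publication[j - 1] <= publication[j]:
--       j += 1
--     res.append(publication[i:j])
--     i = j
--   return res
-- ===== Notes on version B (the rewrite author's own statement) =====
-- stated objective: simpler
-- what changed: Replaces the append-to-last-group fold with a two-pointer scan that finds each run's end index and slices it out in one step; the per-element sorted([prev,cur]) identity test disappears in favour of a plain <= comparison.
import Mathlib
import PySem

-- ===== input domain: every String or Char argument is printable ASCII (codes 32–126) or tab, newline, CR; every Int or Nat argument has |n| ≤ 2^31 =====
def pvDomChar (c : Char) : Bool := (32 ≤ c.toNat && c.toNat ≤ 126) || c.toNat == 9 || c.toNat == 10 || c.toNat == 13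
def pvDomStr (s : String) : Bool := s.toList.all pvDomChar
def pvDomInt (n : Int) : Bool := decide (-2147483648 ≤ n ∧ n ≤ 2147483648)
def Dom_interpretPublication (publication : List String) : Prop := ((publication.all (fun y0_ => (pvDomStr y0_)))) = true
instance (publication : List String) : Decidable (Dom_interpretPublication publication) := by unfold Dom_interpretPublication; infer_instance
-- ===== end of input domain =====

-- B replaces A's append-to-last-group fold (with its per-element sorted([prev,cur]) identity test)
-- by a two-pointer scan that finds each run's end index and slices the run out; objective: simpler.

-- ===== PORT A =====
-- Python's `sorted([prev, cur])[1] is cur` is ported as a value-equality test: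
-- for strings the stable sort puts `cur` at index 1 exactly when prev <= cur, and on equal
-- values the identity test is also True, so the value test coincides with the identity test.
-- pyGetD defaults ("" / []) are only reached on indices A's own branches keep in range.
def stepA (publication : List String) (acc : List (List String)) (p : Int × String) :
    List (List String) :=
  if p.1 == 0 then acc ++ [[p.2]]
  else if (PySem.List.sorted [PySem.List.pyGetD publication (p.1 - 1) "", p.2]
            (fun x => x) false |> (PySem.List.pyGet? · 1)) == some p.2 then
    acc.dropLast ++ [(acc.getLast?).getD [] ++ [p.2]]
  else acc ++ [[p.2]]

def interpretPublication (publication : List String) : List (List String) :=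
  List.foldl (stepA publication) [] (PySem.List.enumerate publication 0)

-- ===== PORT B =====
-- inner while: advance j while j < n and publication[j-1] <= publication[j]
def runEnd (publication : List String) (n j : Nat) : Nat :=
  if j < n ∧ publication.getD (j - 1) "" ≤ publication.getD j "" then
    runEnd publication n (j + 1)
  else j
termination_by n - j
decreasing_by omega

theorem le_runEnd (publication : List String) (n j : Nat) : j ≤ runEnd publication n j := by
  unfold runEnd
  split
  · calc j ≤ j + 1 := by omega
      _ ≤ _ := le_runEnd publication n (j + 1)
  · exact le_rfl
termination_by n - j
decreasing_by rename_i h; omega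

-- outer while over i
def goB (publication : List String) (n i : Nat) : List (List String) :=
  if h : i < n then
    let j := runEnd publication n (i + 1)
    PySem.List.slice publication (some (i : Int)) (some (j : Int)) :: goB publication n j
  else []
termination_by n - i
decreasing_by have := le_runEnd publication n (i + 1); omega

def interpretPublication_alt (publication : List String) : List (List String) :=
  goB publication publication.length 0

-- ===== PRECONDITION & SPEC =====
def Spec_interpretPublication (publication : List String) (out : List (List String)) : Prop := out = interpretPublication_alt publication
instance (publication : List String) (out : List (List String)) : Decidable (Spec_interpretPublication publication out) := by unfold Spec_interpretPublication; infer_instance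

-- ===== CLAIM (what is proved, stated in full; the proofs are below) =====
def Claim_equal_interpretPublication : Prop := ∀ (publication : List String), Dom_interpretPublication publication → Spec_interpretPublication publication (interpretPublication publication)

-- ===== LEMMAS AND PROOFS =====

-- middle layer: run peeling on the list structure
def peel (prev : String) : List String → List String × List String
  | [] => ([], [])
  | x :: xs => if prev ≤ x then ((peel x xs).1.cons x, (peel x xs).2) else ([], x :: xs)

theorem peel_append (prev : String) (ys : List String) :
    (peel prev ys).1 ++ (peel prev ys).2 = ys := by
  induction ys generalizing prev with
  | nil => simp [peel]
  | cons y ys ih =>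
    by_cases h : prev ≤ y
    · simp [peel, h, ih y]
    · simp [peel, h]

theorem peel_snd_le (prev : String) (ys : List String) :
    (peel prev ys).2.length ≤ ys.length := by
  have := congrArg List.length (peel_append prev ys)
  simp at this; omega

def runs : List String → List (List String)
  | [] => []
  | x :: xs => ((peel x xs).1.cons x) :: runs (peel x xs).2
termination_by ys => ys.length
decreasing_by have := peel_snd_le x xs; simp; omega

theorem sorted_pair (a b : String) :
    PySem.List.sorted [a, b] (fun x => x) false = if a ≤ b then [a, b] else [b, a] := by
  by_cases h : a ≤ b
  · simp [PySem.List.sorted, PySem.List.insertBy, h, String.lt_iff_toList_lt]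
    intro hlt
    exact absurd h (not_le.mpr (String.lt_iff_toList_lt.mpr hlt))
  · simp [PySem.List.sorted, PySem.List.insertBy, h]
    intro hle
    exact absurd (String.le_iff_toList_le.mpr hle) h

-- A's elif test equals prev ≤ cur
theorem stepA_test (a b : String) :
    ((PySem.List.sorted [a, b] (fun x => x) false |> (PySem.List.pyGet? · 1)) == some b) = decide (a ≤ b) := by
  rw [sorted_pair]
  by_cases h : a ≤ b
  · simp [h]
  · simp [h]
    intro hba
    exact absurd (le_of_eq hba) h

-- A's fold, with the index bookkeeping removed: prev carried along
def sfold (prev : String) (acc : List (List String)) : List String → List (List String)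
  | [] => acc
  | x :: xs =>
    if prev ≤ x then sfold x (acc.dropLast ++ [(acc.getLast?).getD [] ++ [x]]) xs
    else sfold x (acc ++ [[x]]) xs

theorem foldl_stepA_eq_sfold (publication : List String) (xs : List String) (i : Nat)
    (prev : String) (acc : List (List String)) (hi : 1 ≤ i)
    (hdrop : publication.drop i = xs) (hprev : publication.getD (i - 1) "" = prev) :
    List.foldl (stepA publication) acc (PySem.List.enumerate xs (i : Int)) =
      sfold prev acc xs := by
  induction xs generalizing i prev acc with
  | nil => simp [PySem.List.enumerate_nil, sfold]
  | cons x xs ih =>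
    have hilt : i < publication.length := by
      by_contra hge
      simp [List.drop_eq_nil_of_le (by omega : publication.length ≤ i)] at hdrop
    have hx : publication.getD i "" = x := by
      have hq : (List.drop i publication)[0]? = publication[i + 0]? := List.getElem?_drop
      rw [hdrop] at hq
      simp only [List.getElem?_cons_zero, Nat.add_zero] at hq
      simp [List.getD_eq_getElem?_getD, ← hq]
    rw [PySem.List.enumerate_cons, List.foldl_cons]
    have hstep : stepA publication acc ((i : Int), x) =
        if prev ≤ x then acc.dropLast ++ [(acc.getLast?).getD [] ++ [x]] else acc ++ [[x]] := by
      unfold stepA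
      have h0 : (((i : Int)) == 0) = false := by simp; omega
      have hcast : ((i : Int) - 1) = ((i - 1 : Nat) : Int) := by omega
      rw [h0, hcast]
      simp only [PySem.List.pyGetD_natCast, hprev, stepA_test]
      by_cases h : prev ≤ x <;> simp [h]
    rw [hstep]
    have hdrop' : publication.drop (i + 1) = xs := by
      rw [← List.drop_drop, hdrop]; simp
    have hprev' : publication.getD ((i + 1) - 1) "" = x := by simpa using hx
    have hcast1 : ((i : Int) + 1) = ((i + 1 : Nat) : Int) := by omega
    by_cases h : prev ≤ x
    · rw [if_pos h, hcast1, ih (i + 1) x _ (by omega) hdrop' hprev']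
      simp [sfold, h]
    · rw [if_neg h, hcast1, ih (i + 1) x _ (by omega) hdrop' hprev']
      simp [sfold, h]

theorem sfold_eq_runs (xs : List String) (prev : String) (front : List (List String))
    (run : List String) :
    sfold prev (front ++ [run]) xs =
      front ++ (run ++ (peel prev xs).1) :: runs (peel prev xs).2 := by
  induction xs generalizing prev front run with
  | nil => simp [sfold, peel, runs]
  | cons x xs ih =>
    by_cases h : prev ≤ x
    · rw [sfold, if_pos h]
      rw [List.dropLast_concat, List.getLast?_concat]
      simp only [Option.getD_some]
      rw [ih x front (run ++ [x])]
      simp [peel, h]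
    · rw [sfold, if_neg h]
      rw [show front ++ [run] ++ [[x]] = (front ++ [run]) ++ [[x]] by simp]
      rw [ih x (front ++ [run]) [x]]
      simp [peel, h, runs]

-- B's scan computes runs
theorem runEnd_eq_peel (publication : List String) (j : Nat) (prev : String) (ys : List String)
    (hj : 1 ≤ j) (hdrop : publication.drop j = ys)
    (hprev : publication.getD (j - 1) "" = prev) :
    runEnd publication publication.length j = j + (peel prev ys).1.length := by
  induction ys generalizing j prev with
  | nil =>
    have hge : publication.length ≤ j := by
      by_contra hlt
      have : publication.drop j ≠ [] := by
        simp [List.drop_eq_nil_iff]; omega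
      exact this hdrop
    rw [runEnd, if_neg (fun hc => absurd hc.1 (by omega))]
    simp [peel]
  | cons y ys ih =>
    have hjlt : j < publication.length := by
      by_contra hge
      simp [List.drop_eq_nil_of_le (by omega : publication.length ≤ j)] at hdrop
    have hy : publication.getD j "" = y := by
      have hq : (List.drop j publication)[0]? = publication[j + 0]? := List.getElem?_drop
      rw [hdrop] at hq
      simp only [List.getElem?_cons_zero, Nat.add_zero] at hq
      simp [List.getD_eq_getElem?_getD, ← hq]
    rw [runEnd]
    by_cases h : prev ≤ y
    · rw [if_pos ⟨hjlt, by rw [hprev, hy]; exact h⟩]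
      have hdrop' : publication.drop (j + 1) = ys := by
        rw [← List.drop_drop, hdrop]; simp
      rw [ih (j + 1) y (by omega) hdrop' (by simpa using hy)]
      simp [peel, h]; omega
    · rw [if_neg (by rw [hprev, hy]; tauto)]
      simp [peel, h]

theorem goB_eq_runs (publication : List String) (i : Nat) (ys : List String)
    (hdrop : publication.drop i = ys) :
    goB publication publication.length i = runs ys := by
  induction ys using runs.induct generalizing i with
  | case1 =>
    have hge : publication.length ≤ i := by
      by_contra hlt
      have : publication.drop i ≠ [] := by simp [List.drop_eq_nil_iff]; omega
      exact this hdrop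
    rw [goB, dif_neg (by omega)]
    simp [runs]
  | case2 x xs ih =>
    have hilt : i < publication.length := by
      by_contra hge
      simp [List.drop_eq_nil_of_le (by omega : publication.length ≤ i)] at hdrop
    have hx : publication.getD i "" = x := by
      have hq : (List.drop i publication)[0]? = publication[i + 0]? := List.getElem?_drop
      rw [hdrop] at hq
      simp only [List.getElem?_cons_zero, Nat.add_zero] at hq
      simp [List.getD_eq_getElem?_getD, ← hq]
    have hdrop1 : publication.drop (i + 1) = xs := by
      rw [← List.drop_drop, hdrop]; simp
    have hre : runEnd publication publication.length (i + 1) =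
        (i + 1) + (peel x xs).1.length := by
      exact runEnd_eq_peel publication (i + 1) x xs (by omega) hdrop1 (by simpa using hx)
    have hslice : PySem.List.slice publication (some (i : Int))
        (some ((runEnd publication publication.length (i + 1) : Nat) : Int)) =
        x :: (peel x xs).1 := by
      rw [PySem.List.slice_natCast, hdrop, hre]
      have : (i + 1 + (peel x xs).1.length) - i = (peel x xs).1.length + 1 := by omega
      rw [this]
      have hsplit : x :: xs = (x :: (peel x xs).1) ++ (peel x xs).2 := by
        simp [peel_append x xs]
      rw [hsplit, List.take_append_of_le_length (by simp)]
      simp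
    have hdropj : publication.drop (runEnd publication publication.length (i + 1)) =
        (peel x xs).2 := by
      rw [hre, ← List.drop_drop, hdrop1]
      have hsplit : xs = (peel x xs).1 ++ (peel x xs).2 := (peel_append x xs).symm
      calc List.drop (peel x xs).1.length xs
          = List.drop (peel x xs).1.length ((peel x xs).1 ++ (peel x xs).2) := by rw [← hsplit]
        _ = (peel x xs).2 := by simp
    rw [goB, dif_pos hilt]
    simp only [hslice]
    rw [ih _ hdropj]
    simp [runs]

-- ===== VERDICT (by name: the statement is the Claim_ definition above) =====
theorem interpretPublication_spec : Claim_equal_interpretPublication := by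
  intro publication _
  unfold Spec_interpretPublication interpretPublication interpretPublication_alt
  rw [goB_eq_runs publication 0 publication (by simp)]
  cases publication with
  | nil => simp [PySem.List.enumerate_nil, runs]
  | cons x xs =>
    rw [PySem.List.enumerate_cons]
    rw [List.foldl_cons]
    have h0 : stepA (x :: xs) [] ((0 : Int), x) = [[x]] := by
      unfold stepA; simp
    rw [h0]
    have : (0 : Int) + 1 = ((1 : Nat) : Int) := by norm_num
    rw [this, foldl_stepA_eq_sfold (x :: xs) xs 1 x [[x]] (by omega) (by simp) (by simp)]
    rw [show ([[x]] : List (List String)) = [] ++ [[x]] by simp]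
    rw [sfold_eq_runs xs x [] [x]]
    simp [runs]
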